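-- pv_equiv track=rewrite | github.com/yanshg/daily_coding_problems | solutions/419_shortest_decrements.py | get_shortest_decrements
-- ===== SOURCE A (Python) =====
-- from collections import deque
-- import math
--
-- def get_decrements(n):
--     end=int(math.sqrt(n))
--     return [n-1] + [ n//i for i in range(end,1,-1) if n%i==0 ]
--
-- def get_shortest_decrements(n):
--     dq=deque([(n,[n])])
--     while dq:
--         num,path=dq.popleft()
--         if num==1:
--             return path
--
--         for d in get_decrements(num):
--             dq.append((d,path+[d]))
--
--     return None
-- ===== SOURCE B (Python) =====
-- # B: BFS with a visited set (dedup), queue of paths; same first-found shortest path as A's exhaustive BFS.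
-- from collections import deque
-- import math
--
-- def get_decrements(n):
--     end=int(math.sqrt(n))
--     return [n-1] + [ n//i for i in range(end,1,-1) if n%i==0 ]
--
-- def get_shortest_decrements(n):
--     seen = {n}
--     queue = deque([[n]])
--     while queue:
--         path = queue.popleft()
--         num = path[-1]
--         if num == 1:
--             return path
--         for d in get_decrements(num):
--             if d not in seen:
--                 seen.add(d)
--                 queue.append(path + [d])
--     return None
-- ===== Notes on version B (the rewrite author's own statement) =====
-- stated objective: faster
-- what changed: A is an exhaustive BFS that re-enqueues every number each time it is reached (exponentially many queue entries); B is BFS with a visited set (and a queue of paths), expanding each number at most once, which provably returns the same first-found shortest path.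
import Mathlib
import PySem

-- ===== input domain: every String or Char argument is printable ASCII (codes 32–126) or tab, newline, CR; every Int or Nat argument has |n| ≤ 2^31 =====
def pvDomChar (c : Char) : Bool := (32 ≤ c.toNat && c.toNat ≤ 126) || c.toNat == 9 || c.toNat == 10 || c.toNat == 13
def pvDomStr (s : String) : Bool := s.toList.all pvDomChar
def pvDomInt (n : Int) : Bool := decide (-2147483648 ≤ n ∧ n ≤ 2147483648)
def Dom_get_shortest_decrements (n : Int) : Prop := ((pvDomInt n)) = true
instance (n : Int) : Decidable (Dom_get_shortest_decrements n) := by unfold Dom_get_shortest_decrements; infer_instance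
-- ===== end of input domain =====

-- B replaces A's exhaustive breadth-first search (which re-enqueues and re-expands the same
-- numbers over and over) by breadth-first search with a visited set, skipping every number
-- already seen; it returns the same first-found shortest path. Objective: faster.

-- ===== PORT A =====

-- int(math.sqrt(m)) for 0 ≤ m: the floor integer square root; exact on the stated domain
-- 0 ≤ m ≤ 2^31 (there the correctly-rounded double sqrt has floor = isqrt).
def pvSqrt (m : Int) : Int := (m.toNat.sqrt : Int)

-- get_decrements(n) = [n-1] + [n//i for i in range(int(math.sqrt(n)),1,-1) if n%i==0]
def decrements (n : Int) : List Int :=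
  (n - 1) ::
    ((PySem.List.pyRange (pvSqrt n) 1 (-1)).filter
        (fun i => PySem.Int.mod n i == 0)).map (fun i => PySem.Int.floordiv n i)

-- weight measure, used only for termination of the two BFS loops
def entryWeight (m : Int) : Nat := Nat.factorial (2 * (m + 1).toNat)

def wA (q : List (Int × List Int)) : Nat := (q.map (fun e => entryWeight e.1)).sum

def wB (q : List (List Int)) : Nat := (q.map (fun p => entryWeight (p.getLastD 0))).sum

theorem pvSqrt_le (m : Int) (h : 0 ≤ m) : pvSqrt m ≤ m := by
  unfold pvSqrt
  have := Nat.sqrt_le_self m.toNat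
  omega

theorem pvSqrt_two_le (m : Int) (h : 2 ≤ pvSqrt m) : 4 ≤ m := by
  unfold pvSqrt at h
  have h2 : 2 ≤ m.toNat.sqrt := by omega
  have := Nat.le_sqrt.mp h2
  omega

theorem decrements_le (m : Int) (h : 0 ≤ m) : ∀ c ∈ decrements m, c ≤ m - 1 := by
  intro c hc
  simp only [decrements, List.mem_cons, List.mem_map, List.mem_filter] at hc
  rcases hc with rfl | ⟨i, ⟨hi, _⟩, rfl⟩
  · omega
  · rw [PySem.List.mem_pyRange_neg_one] at hi
    have h4 : 4 ≤ m := pvSqrt_two_le m (by omega)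
    rw [PySem.Int.floordiv_eq_ediv_of_pos (by omega)]
    have h1 : m / i * i ≤ m := Int.ediv_mul_le m (by omega)
    have h0 : 0 ≤ m / i := Int.ediv_nonneg h (by omega)
    have : m / i * 2 ≤ m := by nlinarith
    omega

theorem decrements_length (m : Int) (h : 0 ≤ m) : (decrements m).length ≤ m.toNat + 1 := by
  simp only [decrements, List.length_cons, List.length_map]
  have h1 := List.length_filter_le (fun i => PySem.Int.mod m i == 0)
      (PySem.List.pyRange (pvSqrt m) 1 (-1))
  rw [PySem.List.length_pyRange_neg_one] at h1
  have h2 := pvSqrt_le m h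
  omega

theorem sum_decrements_lt (m : Int) (h : 0 ≤ m) :
    ((decrements m).map entryWeight).sum < entryWeight m := by
  have hbound : ∀ x ∈ (decrements m).map entryWeight, x ≤ Nat.factorial (2 * m.toNat) := by
    intro x hx
    simp only [List.mem_map] at hx
    obtain ⟨c, hc, rfl⟩ := hx
    have hle := decrements_le m h c hc
    apply Nat.factorial_le
    omega
  have hsum : ((decrements m).map entryWeight).sum ≤
      (decrements m).length * Nat.factorial (2 * m.toNat) := by
    have := List.sum_le_card_nsmul _ _ hbound
    simpa using this
  have hlen := decrements_length m h
  have hfe : entryWeight m = Nat.factorial (2 * m.toNat + 2) := by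
    unfold entryWeight
    congr 1
    omega
  rw [hfe]
  have hfact : Nat.factorial (2 * m.toNat + 2)
      = (2 * m.toNat + 2) * ((2 * m.toNat + 1) * Nat.factorial (2 * m.toNat)) := by
    rw [Nat.factorial_succ, Nat.factorial_succ]
  have hp := Nat.factorial_pos (2 * m.toNat)
  have hmul : (decrements m).length * Nat.factorial (2 * m.toNat)
      ≤ (m.toNat + 1) * Nat.factorial (2 * m.toNat) := Nat.mul_le_mul_right _ hlen
  rw [hfact]
  nlinarith
theorem wA_step (num : Int) (path : List Int) (rest : List (Int × List Int)) (h : 0 ≤ num) :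
    wA (rest ++ (decrements num).map (fun d => (d, path ++ [d]))) < wA ((num, path) :: rest) := by
  have h1 := sum_decrements_lt num h
  simp only [wA, List.map_append, List.sum_append, List.map_map, List.map_cons, List.sum_cons,
    Function.comp_def]
  have h2 : ((decrements num).map (fun x => entryWeight x)).sum
      = ((decrements num).map entryWeight).sum := rfl
  omega

-- port of A: while dq: num,path = dq.popleft(); if num==1: return path; enqueue all children
def bfsA (q : List (Int × List Int)) : List Int :=
  match q with
  | [] => []                                    -- 'return None' (unreachable under Pre_)
  | (num, path) :: rest =>
    if num = 1 then path
    else if _h2 : num < 0 then []               -- Python: math.sqrt(num) raises ValueError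
    else bfsA (rest ++ (decrements num).map (fun d => (d, path ++ [d])))
termination_by wA q
decreasing_by exact wA_step num path rest (by omega)

def get_shortest_decrements (n : Int) : List Int := bfsA [(n, [n])]

-- ===== PORT B =====

-- one step of B's inner loop: 'if d not in seen: seen.add(d); queue.append(path+[d])'
def bstep (path : List Int) (s : PySem.Set Int × List (List Int)) (d : Int) :
    PySem.Set Int × List (List Int) :=
  if PySem.Set.contains s.1 d then s else (PySem.Set.add s.1 d, s.2 ++ [path ++ [d]])

theorem wB_foldl_le (path : List Int) (cs : List Int) :
    ∀ s : PySem.Set Int × List (List Int),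
      wB (cs.foldl (bstep path) s).2 ≤ wB s.2 + (cs.map entryWeight).sum := by
  induction cs with
  | nil => intro s; simp
  | cons c cs ih =>
    intro s
    simp only [List.foldl_cons, List.map_cons, List.sum_cons]
    have h2 := ih (bstep path s c)
    have h3 : wB (bstep path s c).2 ≤ wB s.2 + entryWeight c := by
      unfold bstep
      split
      · omega
      · simp [wB]
    omega

-- port of B: BFS over paths with a visited set; num = path[-1]
def bfsB (V : PySem.Set Int) (q : List (List Int)) : List Int :=
  match q with
  | [] => []                                    -- 'return None' (unreachable under Pre_)
  | path :: rest =>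
    match hnum : PySem.List.pyGet? path (-1) with
    | none => []                                -- path[-1] on []: unreachable, paths are nonempty
    | some num =>
      if num = 1 then path
      else if _h2 : num < 0 then []             -- Python: math.sqrt(num) raises ValueError
      else
        let s := (decrements num).foldl (bstep path) (V, rest)
        bfsB s.1 s.2
termination_by wB q
decreasing_by
  have h1 := wB_foldl_le path (decrements num) (V, rest)
  have h2 := sum_decrements_lt num (by omega)
  have h3 : path.getLastD 0 = num := by
    rw [PySem.List.pyGet?_neg_one] at hnum
    rw [List.getLastD_eq_getLast?, hnum]
    rfl
  simp only [wB, List.map_cons, List.sum_cons, h3] at *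
  omega

def get_shortest_decrements_alt (n : Int) : List Int :=
  bfsB (PySem.Set.ofList [n]) [[n]]

-- ===== PRECONDITION & SPEC =====
-- Pre_ excludes exactly n ≤ 0, where Python A (and B alike) raises ValueError in math.sqrt.
def Pre_get_shortest_decrements (n : Int) : Prop := 1 ≤ n
instance (n : Int) : Decidable (Pre_get_shortest_decrements n) := by
  unfold Pre_get_shortest_decrements; infer_instance

def pvWitness_get_shortest_decrements : Int := 10

def Spec_get_shortest_decrements (n : Int) (out : List Int) : Prop :=
  out = get_shortest_decrements_alt n
instance (n : Int) (out : List Int) : Decidable (Spec_get_shortest_decrements n out) := by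
  unfold Spec_get_shortest_decrements; infer_instance

-- ===== CLAIM (what is proved, stated in full; the proofs are below) =====
def Claim_equal_get_shortest_decrements : Prop :=
  ∀ (n : Int), Dom_get_shortest_decrements n → Pre_get_shortest_decrements n →
    Spec_get_shortest_decrements n (get_shortest_decrements n)

-- ===== LEMMAS AND PROOFS =====

theorem decrements_pos (m : Int) (h : 2 ≤ m) : ∀ c ∈ decrements m, 1 ≤ c := by
  intro c hc
  simp only [decrements, List.mem_cons, List.mem_map, List.mem_filter] at hc
  rcases hc with rfl | ⟨i, ⟨hi, _⟩, rfl⟩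
  · omega
  · rw [PySem.List.mem_pyRange_neg_one] at hi
    have him : i ≤ m := le_trans hi.2 (pvSqrt_le m (by omega))
    rw [PySem.Int.floordiv_eq_ediv_of_pos (by omega)]
    rw [Int.le_ediv_iff_mul_le (by omega)]
    omega


theorem lastD_of_pyGet (p : List Int) (x : Int) (h : PySem.List.pyGet? p (-1) = some x) :
    p.getLastD 0 = x := by
  rw [PySem.List.pyGet?_neg_one] at h
  rw [List.getLastD_eq_getLast?, h]
  rfl

-- Simulation invariant: B's queue `bs` embeds order-preservingly into A's queue `as`; every
-- unmatched A-entry carries a number already in the visited set V whose B-entry (if still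
-- queued) is strictly earlier.
inductive Emb (V : List Int) : List (List Int) → List (Int × List Int) → Prop
  | nil : Emb V [] []
  | push (num : Int) (path : List Int) (bs : List (List Int)) (as : List (Int × List Int)) :
      PySem.List.pyGet? path (-1) = some num → Emb V bs as →
      Emb V (path :: bs) ((num, path) :: as)
  | skip (num : Int) (path : List Int) (bs : List (List Int)) (as : List (Int × List Int)) :
      num ∈ V → (∀ p ∈ bs, p.getLastD 0 ≠ num) → Emb V bs as →
      Emb V bs ((num, path) :: as)

def SimInv (V : List Int) (bs : List (List Int)) (as : List (Int × List Int)) : Prop :=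
  Emb V bs as ∧
  (∀ m ∈ V, 1 ≤ m) ∧
  (∀ p ∈ bs, p.getLastD 0 ∈ V) ∧
  (∀ m ∈ V, (∀ p ∈ bs, p.getLastD 0 ≠ m) → m ≠ 1 ∧ ∀ c ∈ decrements m, c ∈ V)

theorem emb_nil (V : List Int) (bs : List (List Int)) (h : Emb V bs []) : bs = [] := by
  cases h; rfl

theorem emb_append_extra (V : List Int) (bs : List (List Int)) (as : List (Int × List Int))
    (h : Emb V bs as) (num : Int) (path : List Int) (hv : num ∈ V) :
    Emb V bs (as ++ [(num, path)]) := by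
  induction h with
  | nil => exact Emb.skip _ _ _ _ hv (by simp) Emb.nil
  | push num' path' bs' as' hlast _ ih => exact Emb.push _ _ _ _ hlast ih
  | skip num' path' bs' as' hv' hbs _ ih => exact Emb.skip _ _ _ _ hv' hbs ih

theorem emb_append_extras (V : List Int) (bs : List (List Int)) (as : List (Int × List Int))
    (h : Emb V bs as) (xs : List (Int × List Int)) (hxs : ∀ e ∈ xs, e.1 ∈ V) :
    Emb V bs (as ++ xs) := by
  induction xs generalizing as with
  | nil => simpa using h
  | cons x xs ih =>
    have h1 := emb_append_extra V bs as h x.1 x.2 (hxs x (by simp))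
    have h2 := ih (as ++ [x]) h1 (fun e he => hxs e (by simp [he]))
    simpa using h2

theorem emb_snoc_push (V : List Int) (bs : List (List Int)) (as : List (Int × List Int))
    (h : Emb V bs as) (c : Int) (path : List Int) (hc : c ∉ V) :
    Emb (V ++ [c]) (bs ++ [path ++ [c]]) (as ++ [(c, path ++ [c])]) := by
  have hlast : PySem.List.pyGet? (path ++ [c]) (-1) = some c := by
    rw [PySem.List.pyGet?_neg_one, List.getLast?_concat]
  induction h with
  | nil => exact Emb.push _ _ _ _ hlast Emb.nil
  | push num' path' bs' as' hl _ ih => exact Emb.push _ _ _ _ hl ih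
  | skip num' path' bs' as' hv' hbs _ ih =>
    refine Emb.skip _ _ _ _ (by simp [hv']) ?_ ih
    intro p hp
    rcases List.mem_append.mp hp with hp | hp
    · exact hbs p hp
    · simp only [List.mem_singleton] at hp
      subst hp
      rw [List.getLastD_concat]
      intro hcc
      exact hc (hcc ▸ hv')

theorem contains_iff (V : List Int) (c : Int) :
    PySem.Set.contains V c = true ↔ c ∈ V := by
  simp [PySem.Set.contains]

theorem add_eq_append (V : List Int) (c : Int) (hc : c ∉ V) :
    PySem.Set.add V c = V ++ [c] := by
  unfold PySem.Set.add
  rw [if_neg]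
  intro h
  exact hc ((contains_iff V c).mp h)

-- facts about one run of B's inner fold over the children list cs
theorem fold_V_mono (path : List Int) (cs : List Int) :
    ∀ (V : List Int) (bs : List (List Int)) (m : Int), m ∈ V →
      m ∈ (cs.foldl (bstep path) (V, bs)).1 := by
  induction cs with
  | nil => intro V bs m hm; exact hm
  | cons c cs ih =>
    intro V bs m hm
    simp only [List.foldl_cons]
    unfold bstep
    split
    · exact ih V bs m hm
    · exact ih _ _ m (by rw [add_eq_append] <;> simp_all)

theorem fold_q_mono (path : List Int) (cs : List Int) :
    ∀ (V : List Int) (bs : List (List Int)) (p : List Int), p ∈ bs →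
      p ∈ (cs.foldl (bstep path) (V, bs)).2 := by
  induction cs with
  | nil => intro V bs p hp; exact hp
  | cons c cs ih =>
    intro V bs p hp
    simp only [List.foldl_cons]
    unfold bstep
    split
    · exact ih V bs p hp
    · exact ih _ _ p (by simp [hp])

theorem fold_children_mem (path : List Int) (cs : List Int) :
    ∀ (V : List Int) (bs : List (List Int)) (c : Int), c ∈ cs →
      c ∈ (cs.foldl (bstep path) (V, bs)).1 := by
  induction cs with
  | nil => intro V bs c hc; simp at hc
  | cons c' cs ih =>
    intro V bs c hc
    simp only [List.foldl_cons]
    rcases List.mem_cons.mp hc with rfl | hc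
    · unfold bstep
      split
      · next hct => exact fold_V_mono path cs _ _ c ((contains_iff _ c).mp hct)
      · next hct =>
        apply fold_V_mono path cs _ _ c
        rw [add_eq_append _ _ (fun h => hct ((contains_iff _ c).mpr h))]
        simp
    · exact ih _ _ c hc

theorem fold_V_from (path : List Int) (cs : List Int) :
    ∀ (V : List Int) (bs : List (List Int)) (m : Int),
      m ∈ (cs.foldl (bstep path) (V, bs)).1 → m ∈ V ∨ m ∈ cs := by
  induction cs with
  | nil => intro V bs m hm; exact Or.inl hm
  | cons c cs ih =>
    intro V bs m hm
    simp only [List.foldl_cons] at hm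
    unfold bstep at hm
    split at hm
    · rcases ih V bs m hm with h | h
      · exact Or.inl h
      · exact Or.inr (by simp [h])
    · next hct =>
      rcases ih _ _ m hm with h | h
      · rw [add_eq_append _ _ (fun h2 => hct ((contains_iff _ c).mpr h2))] at h
        rcases List.mem_append.mp h with h | h
        · exact Or.inl h
        · simp only [List.mem_singleton] at h
          exact Or.inr (by simp [h])
      · exact Or.inr (by simp [h])

theorem fold_q_from (path : List Int) (cs : List Int) :
    ∀ (V : List Int) (bs : List (List Int)) (p : List Int),
      p ∈ (cs.foldl (bstep path) (V, bs)).2 → p ∈ bs ∨ ∃ c ∈ cs, p = path ++ [c] := by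
  induction cs with
  | nil => intro V bs p hp; exact Or.inl hp
  | cons c cs ih =>
    intro V bs p hp
    simp only [List.foldl_cons] at hp
    unfold bstep at hp
    split at hp
    · rcases ih V bs p hp with h | ⟨c', hc', h⟩
      · exact Or.inl h
      · exact Or.inr ⟨c', by simp [hc'], h⟩
    · rcases ih _ _ p hp with h | ⟨c', hc', h⟩
      · rcases List.mem_append.mp h with h | h
        · exact Or.inl h
        · simp only [List.mem_singleton] at h
          exact Or.inr ⟨c, by simp, h⟩
      · exact Or.inr ⟨c', by simp [hc'], h⟩

theorem fold_new_in_q (path : List Int) (cs : List Int) :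
    ∀ (V : List Int) (bs : List (List Int)) (m : Int),
      m ∈ (cs.foldl (bstep path) (V, bs)).1 → m ∉ V →
      ∃ p ∈ (cs.foldl (bstep path) (V, bs)).2, p.getLastD 0 = m := by
  induction cs with
  | nil => intro V bs m hm hnm; exact absurd hm hnm
  | cons c cs ih =>
    intro V bs m hm hnm
    simp only [List.foldl_cons] at hm ⊢
    by_cases hct : PySem.Set.contains V c = true
    · rw [show bstep path (V, bs) c = (V, bs) by
            unfold bstep; simp [(contains_iff V c).mp hct]] at hm ⊢
      exact ih V bs m hm hnm
    · have hcV : c ∉ V := fun h => hct ((contains_iff _ c).mpr h)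
      rw [show bstep path (V, bs) c = (V ++ [c], bs ++ [path ++ [c]]) by
            unfold bstep; rw [if_neg hct, add_eq_append _ _ hcV]] at hm ⊢
      by_cases hmc : m = c
      · subst hmc
        exact ⟨path ++ [m], fold_q_mono path cs _ _ _ (by simp), List.getLastD_concat⟩
      · refine ih _ _ m hm ?_
        simp only [List.mem_append, List.mem_singleton]
        rintro (h | h)
        · exact hnm h
        · exact hmc h

theorem fold_emb (path : List Int) (cs : List Int) :
    ∀ (V : List Int) (bs : List (List Int)) (as : List (Int × List Int)),
      Emb V bs as →
      Emb (cs.foldl (bstep path) (V, bs)).1 (cs.foldl (bstep path) (V, bs)).2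
        (as ++ cs.map (fun d => (d, path ++ [d]))) := by
  induction cs with
  | nil => intro V bs as h; simpa using h
  | cons c cs ih =>
    intro V bs as h
    simp only [List.foldl_cons, List.map_cons]
    rw [show as ++ (c, path ++ [c]) :: cs.map (fun d => (d, path ++ [d]))
        = (as ++ [(c, path ++ [c])]) ++ cs.map (fun d => (d, path ++ [d])) by simp]
    unfold bstep
    split
    · next hct =>
      have hcV : c ∈ V := (contains_iff _ c).mp hct
      exact ih V bs _ (emb_append_extra V bs as h c (path ++ [c]) hcV)
    · next hct =>
      have hcV : c ∉ V := fun h2 => hct ((contains_iff _ c).mpr h2)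
      rw [add_eq_append _ _ hcV]
      exact ih _ _ _ (emb_snoc_push V bs as h c path hcV)

theorem bfsA_cons (num : Int) (path : List Int) (rest : List (Int × List Int)) :
    bfsA ((num, path) :: rest) = if num = 1 then path else if num < 0 then [] else
      bfsA (rest ++ (decrements num).map (fun d => (d, path ++ [d]))) := by
  rw [bfsA]
  by_cases h1 : num = 1 <;> simp only [h1, if_pos, ite_false] <;>
    by_cases h2 : num < 0 <;> simp [h2]

theorem bfsB_cons (V : List Int) (path : List Int) (rest : List (List Int)) (num : Int)
    (h : PySem.List.pyGet? path (-1) = some num) :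
    bfsB V (path :: rest) = if num = 1 then path else if num < 0 then [] else
      bfsB ((decrements num).foldl (bstep path) (V, rest)).1
        ((decrements num).foldl (bstep path) (V, rest)).2 := by
  rw [bfsB]
  split
  · next h2 => rw [h2] at h; cases h
  · next b h2 =>
    rw [h2] at h
    cases h
    by_cases h1 : num = 1 <;> simp only [h1, ite_false, if_pos] <;>
      by_cases hn : num < 0 <;> simp [hn]

theorem bfs_agree : ∀ (W : Nat) (as : List (Int × List Int)) (V : List Int)
    (bs : List (List Int)), wA as ≤ W → SimInv V bs as → bfsA as = bfsB V bs := by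
  intro W
  induction W with
  | zero =>
    intro as V bs hW hInv
    cases as with
    | nil =>
      have hbs := emb_nil _ _ hInv.1
      subst hbs
      rw [bfsA, bfsB]
    | cons e as' =>
      exfalso
      have h1 : 1 ≤ entryWeight e.1 := Nat.factorial_pos _
      simp only [wA, List.map_cons, List.sum_cons] at hW
      omega
  | succ W ih =>
    intro as V bs hW hInv
    obtain ⟨hEmb, hVpos, hlastV, hClosed⟩ := hInv
    cases as with
    | nil =>
      have hbs := emb_nil _ _ hEmb
      subst hbs
      rw [bfsA, bfsB]
    | cons e as' =>
      obtain ⟨num, path⟩ := e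
      cases hEmb
      case push bs' hlast hEmb' =>
        have hnum : path.getLastD 0 = num := lastD_of_pyGet path num hlast
        have hnumV : num ∈ V := by
          have := hlastV path (by simp)
          rwa [hnum] at this
        have hnum1 : 1 ≤ num := hVpos num hnumV
        rw [bfsA_cons, bfsB_cons V path bs' num hlast]
        by_cases h1 : num = 1
        · simp [h1]
        · rw [if_neg h1, if_neg (by omega : ¬ num < 0), if_neg h1,
            if_neg (by omega : ¬ num < 0)]
          have hnum2 : 2 ≤ num := by omega
          apply ih
          · have := wA_step num path as' (by omega)
            omega
          · refine ⟨fold_emb path (decrements num) V bs' as' hEmb', ?_, ?_, ?_⟩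
            · intro m hm
              rcases fold_V_from path (decrements num) V bs' m hm with h | h
              · exact hVpos m h
              · exact decrements_pos num hnum2 m h
            · intro p hp
              rcases fold_q_from path (decrements num) V bs' p hp with h | ⟨c, hc, rfl⟩
              · exact fold_V_mono path (decrements num) V bs' _ (hlastV p (by simp [h]))
              · rw [List.getLastD_concat]
                exact fold_children_mem path (decrements num) V bs' c hc
            · intro m hm hnone
              have hmV : m ∈ V := by
                by_contra hmV
                obtain ⟨p, hp, hl⟩ := fold_new_in_q path (decrements num) V bs' m hm hmV
                exact hnone p hp hl
              by_cases hmn : m = num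
              · subst hmn
                exact ⟨h1, fun c hc => fold_children_mem path (decrements m) V bs' c hc⟩
              · have hcl := hClosed m hmV ?_
                · exact ⟨hcl.1, fun c hc =>
                    fold_V_mono path (decrements num) V bs' c (hcl.2 c hc)⟩
                · intro p hp
                  rcases List.mem_cons.mp hp with rfl | hp
                  · rw [hnum]
                    exact fun h => hmn h.symm
                  · exact hnone p (fold_q_mono path (decrements num) V bs' p hp)
      case skip hv hbs hEmb' =>
        obtain ⟨hne1, hsub⟩ := hClosed num hv hbs
        have hpos := hVpos num hv
        rw [bfsA_cons, if_neg hne1, if_neg (by omega : ¬ num < 0)]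
        apply ih
        · have := wA_step num path as' (by omega)
          omega
        · refine ⟨emb_append_extras V bs as' hEmb' _ ?_, hVpos, hlastV, hClosed⟩
          intro e he
          simp only [List.mem_map] at he
          obtain ⟨d, hd, rfl⟩ := he
          exact hsub d hd

-- ===== VERDICT (by name: the statement is the Claim_ definition above) =====
theorem get_shortest_decrements_spec : Claim_equal_get_shortest_decrements := by
  intro n _hDom hPre
  unfold Spec_get_shortest_decrements get_shortest_decrements get_shortest_decrements_alt
  have hV : PySem.Set.ofList [n] = [n] := rfl
  rw [hV]
  refine bfs_agree (wA [(n, [n])]) _ _ _ le_rfl ⟨?_, ?_, ?_, ?_⟩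
  · exact Emb.push _ _ _ _ (by rw [PySem.List.pyGet?_neg_one]; rfl) Emb.nil
  · intro m hm
    simp only [List.mem_singleton] at hm
    subst hm
    exact hPre
  · intro p hp
    simp only [List.mem_singleton] at hp
    subst hp
    simp
  · intro m hm hnone
    simp only [List.mem_singleton] at hm
    subst hm
    exact absurd (hnone [m] (by simp)) (by simp)
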